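-- pv_equiv track=rewrite | github.com/daniel-reich/ubiquitous-fiesta | MFteyMABeuGaga3a7_22.py | color_pattern_times
-- ===== SOURCE A (Python) =====
-- def color_pattern_times(cols):
--   if cols==[]:
--     return 0
--   t=-1
--   c=0
--   for x in cols:
--     if x==c:
--       t+=2
--     else:
--       c=x
--       t+=3
--   return t
-- ===== SOURCE B (Python) =====
-- def color_pattern_times(cols):
--   if cols==[]:
--     return 0
--   # Stage 1: collapse cols into its list of consecutive runs (one value per run).
--   runs = []
--   for x in cols:
--     if not runs or runs[-1] != x:
--       runs.append(x)
--   # Stage 2: closed-form arithmetic on the run structure.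
--   changes = len(runs) - (1 if runs[0] == 0 else 0)
--   return 2 * len(cols) + changes - 1
-- ===== Notes on version B (the rewrite author's own statement) =====
-- stated objective: alternative
-- what changed: Replaces A's stateful accumulator loop (running total t and current color c) with a staged computation: first collapse cols to its list of consecutive runs, then a closed-form formula from the run count and whether the first run's color is zero.
import Mathlib
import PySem

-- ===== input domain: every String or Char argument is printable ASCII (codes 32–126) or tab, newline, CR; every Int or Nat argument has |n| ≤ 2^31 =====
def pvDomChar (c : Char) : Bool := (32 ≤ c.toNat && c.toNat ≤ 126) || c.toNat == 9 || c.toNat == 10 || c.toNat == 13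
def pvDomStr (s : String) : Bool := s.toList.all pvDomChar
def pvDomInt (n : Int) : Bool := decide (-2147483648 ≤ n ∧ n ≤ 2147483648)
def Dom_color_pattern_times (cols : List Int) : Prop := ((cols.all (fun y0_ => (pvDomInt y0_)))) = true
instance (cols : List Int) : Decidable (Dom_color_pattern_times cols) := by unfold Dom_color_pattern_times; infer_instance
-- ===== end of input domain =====

-- B replaces A's stateful accumulator loop with a staged computation: collapse cols to its consecutive runs, then a closed-form formula on the run count and the first run (alternative decomposition; same O(n) cost).


-- ===== PORT A =====
def color_pattern_times (cols : List Int) : Int :=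
  if cols = [] then 0
  else
    (cols.foldl (fun (s : Int × Int) x =>
      if x = s.2 then (s.1 + 2, s.2) else (s.1 + 3, x)) (-1, 0)).1

-- ===== PORT B =====
def color_pattern_times_alt (cols : List Int) : Int :=
  if cols = [] then 0
  else
    let runs := cols.foldl (fun (r : List Int) x =>
      if r = [] ∨ r.getLast? ≠ some x then r ++ [x] else r) ([] : List Int)
    let changes : Int := (runs.length : Int) - (if runs.head? = some 0 then 1 else 0)
    2 * cols.length + changes - 1

-- ===== PRECONDITION & SPEC =====
def Spec_color_pattern_times (cols : List Int) (out : Int) : Prop := out = color_pattern_times_alt cols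
instance (cols : List Int) (out : Int) : Decidable (Spec_color_pattern_times cols out) := by unfold Spec_color_pattern_times; infer_instance

-- ===== CLAIM (what is proved, stated in full; the proofs are below) =====
def Claim_equal_color_pattern_times : Prop := ∀ (cols : List Int), Dom_color_pattern_times cols → Spec_color_pattern_times cols (color_pattern_times cols)

-- ===== LEMMAS AND PROOFS =====

-- Change count of A's loop (number of times the else branch fires), starting from current color c.
def cptChg (c : Int) : List Int → Nat
  | [] => 0
  | x :: xs => if x = c then cptChg c xs else cptChg x xs + 1

-- Tail of B's run list after a run ending in color c.
def cptRuns (c : Int) : List Int → List Int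
  | [] => []
  | x :: xs => if x = c then cptRuns c xs else x :: cptRuns x xs

-- A's fold: t grows by 2 per element plus 1 per change.
theorem cpt_foldA (l : List Int) (t c : Int) :
    (l.foldl (fun (s : Int × Int) x =>
        if x = s.2 then (s.1 + 2, s.2) else (s.1 + 3, x)) (t, c)).1
      = t + 2 * l.length + cptChg c l := by
  induction l generalizing t c with
  | nil => simp [cptChg]
  | cons x xs ih =>
    by_cases h : x = c
    · subst h; simp [cptChg, ih]; ring
    · simp [cptChg, h, ih]; ring

-- B's fold extends a nonempty run list r ending in c by the runs of the rest.
theorem cpt_foldB (l : List Int) (r : List Int) (c : Int)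
    (hr : r ≠ []) (hl : r.getLast? = some c) :
    l.foldl (fun (r : List Int) x =>
        if r = [] ∨ r.getLast? ≠ some x then r ++ [x] else r) r
      = r ++ cptRuns c l := by
  induction l generalizing r c with
  | nil => simp [cptRuns]
  | cons x xs ih =>
    simp only [List.foldl_cons]
    by_cases h : x = c
    · subst h
      rw [if_neg (by simp [hr, hl])]
      rw [ih _ _ hr hl]
      simp [cptRuns]
    · rw [if_pos (Or.inr (by simp [hl]; exact fun e => h e.symm))]
      rw [ih (r ++ [x]) x (by simp) (by simp)]
      simp [cptRuns, h]

-- The run tail has one element per change.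
theorem cpt_len (c : Int) (l : List Int) : (cptRuns c l).length = cptChg c l := by
  induction l generalizing c with
  | nil => simp [cptRuns, cptChg]
  | cons x xs ih =>
    by_cases h : x = c <;> simp [cptRuns, cptChg, h, ih]

-- ===== VERDICT (by name: the statement is the Claim_ definition above) =====
theorem color_pattern_times_spec : Claim_equal_color_pattern_times := by
  intro cols _
  unfold Spec_color_pattern_times color_pattern_times color_pattern_times_alt
  cases cols with
  | nil => simp
  | cons x xs =>
    simp only [if_neg (List.cons_ne_nil x xs)]
    rw [cpt_foldA]
    simp only [List.foldl_cons]
    simp only [true_or, if_true, List.nil_append, List.getLast?_nil]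
    rw [cpt_foldB xs [x] x (by simp) (by simp)]
    by_cases h : x = 0 <;>
      simp [cptChg, cpt_len, h] <;> ring
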